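-- pv_equiv track=rewrite | github.com/SELGroup/HISEvent | hierarchical_SE.py | get_split_edges
-- ===== SOURCE A (Python) =====
-- def get_split_edges(cluster_edges, splits):
--     splits_edges = []
--     for split in splits:
--         s = split[0] + 1 # node indexing starts from 1
--         e = split[1]
--         edges = [edge for edge in cluster_edges if (edge[0] >= s and edge[1] <= e)]
--         mapped_edges = [(edge[0]-split[0], edge[1]-split[0]) for edge in edges] # map so that the node indexing of each split starts from 1
--         splits_edges.append(mapped_edges)
--     return splits_edges
-- ===== SOURCE B (Python) =====
-- def get_split_edges(cluster_edges, splits):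
--     # Sort the edges once by their first endpoint, remembering original positions.
--     indexed = sorted(enumerate(cluster_edges), key=lambda t: t[1][0])
--     us = [t[1][0] for t in indexed]
--     res = []
--     for a, b in splits:
--         # bisect_left(us, a + 1): first position whose u is >= a + 1
--         lo, hi = 0, len(us)
--         while lo < hi:
--             mid = (lo + hi) // 2
--             if us[mid] < a + 1:
--                 lo = mid + 1
--             else:
--                 hi = mid
--         picked = sorted(((i, (u - a, v - a)) for i, (u, v) in indexed[lo:] if v <= b),
--                         key=lambda t: t[0])
--         res.append([e for _, e in picked])
--     return res
-- ===== Notes on version B (the rewrite author's own statement) =====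
-- stated objective: alternative
-- what changed: B sorts the edges once by first endpoint with their original positions, binary-searches each split's lower bound a+1 in the sorted endpoint array, filters only that suffix by the upper bound, and restores the original edge order by sorting the kept original indices, instead of A's full filter pass over all edges per split.
import Mathlib
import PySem

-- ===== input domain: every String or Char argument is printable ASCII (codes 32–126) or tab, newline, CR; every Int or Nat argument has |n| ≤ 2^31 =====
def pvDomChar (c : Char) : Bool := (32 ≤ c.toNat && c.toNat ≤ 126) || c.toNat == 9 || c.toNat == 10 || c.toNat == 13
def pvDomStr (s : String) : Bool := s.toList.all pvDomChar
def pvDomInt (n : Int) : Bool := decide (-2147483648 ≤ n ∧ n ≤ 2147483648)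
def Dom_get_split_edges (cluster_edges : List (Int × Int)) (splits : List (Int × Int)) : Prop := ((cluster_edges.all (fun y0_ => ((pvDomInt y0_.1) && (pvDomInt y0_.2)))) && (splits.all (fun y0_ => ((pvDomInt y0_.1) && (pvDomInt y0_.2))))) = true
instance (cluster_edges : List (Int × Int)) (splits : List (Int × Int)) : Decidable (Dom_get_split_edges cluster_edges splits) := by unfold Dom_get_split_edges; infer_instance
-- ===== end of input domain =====

-- B sorts the edges once by first endpoint (keeping original positions), binary-searches each split's
-- lower bound, filters only that suffix, and restores original edge order by sorting the kept indices;
-- an alternative to A's full filter pass over all edges per split (not measured faster).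

-- ===== PORT A =====
def get_split_edges (cluster_edges : List (Int × Int)) (splits : List (Int × Int)) : List (List (Int × Int)) :=
  splits.foldl (fun splits_edges split =>
    let s := split.1 + 1
    let e := split.2
    let edges := cluster_edges.filter (fun ed => s ≤ ed.1 && ed.2 ≤ e)
    let mapped_edges := edges.map (fun ed => (ed.1 - split.1, ed.2 - split.1))
    splits_edges ++ [mapped_edges]) []

-- ===== PORT B =====
-- Source B's hand-written lo/hi loop is CPython's bisect_left algorithm; ported as PySem.List.bisectLeft (exact).
def get_split_edges_alt (cluster_edges : List (Int × Int)) (splits : List (Int × Int)) : List (List (Int × Int)) :=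
  let indexed := PySem.List.sorted (PySem.List.enumerate cluster_edges 0) (fun t => t.2.1) false
  let us := indexed.map (fun t => t.2.1)
  splits.foldl (fun res ab =>
    let lo := PySem.List.bisectLeft us (ab.1 + 1)
    let picked := PySem.List.sorted
        (((indexed.drop lo).filter (fun t => t.2.2 ≤ ab.2)).map
          (fun t => (t.1, (t.2.1 - ab.1, t.2.2 - ab.1))))
        (fun t => t.1) false
    res ++ [picked.map (fun t => t.2)]) []

-- ===== PRECONDITION & SPEC =====
def Spec_get_split_edges (cluster_edges : List (Int × Int)) (splits : List (Int × Int)) (out : List (List (Int × Int))) : Prop := out = get_split_edges_alt cluster_edges splits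
instance (cluster_edges : List (Int × Int)) (splits : List (Int × Int)) (out : List (List (Int × Int))) : Decidable (Spec_get_split_edges cluster_edges splits out) := by unfold Spec_get_split_edges; infer_instance

-- ===== CLAIM (what is proved, stated in full; the proofs are below) =====
def Claim_equal_get_split_edges : Prop := ∀ (cluster_edges : List (Int × Int)) (splits : List (Int × Int)), Dom_get_split_edges cluster_edges splits → Spec_get_split_edges cluster_edges splits (get_split_edges cluster_edges splits)

-- ===== LEMMAS AND PROOFS =====

theorem pv_drop_eq_filter {α : Type} (p : α → Bool) :
    ∀ (S : List α) (n : Nat), n ≤ S.length →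
    (∀ j (hj : j < S.length), j < n → ¬ p S[j]) →
    (∀ j (hj : j < S.length), n ≤ j → p S[j]) →
    S.drop n = S.filter p := by
  intro S
  induction S with
  | nil => intro n _ _ _; simp
  | cons a tl ih =>
      intro n hn hlt hge
      cases n with
      | zero =>
          rw [List.drop_zero, List.filter_eq_self.mpr]
          intro x hx
          obtain ⟨j, hj, rfl⟩ := List.mem_iff_getElem.mp hx
          exact hge j hj (Nat.zero_le j)
      | succ m =>
          have ha : ¬ p a := hlt 0 (by simp) (Nat.succ_pos m)
          simp only [List.drop_succ_cons, List.filter_cons]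
          rw [if_neg (by simpa using ha)]
          exact ih m (by simpa using hn)
            (fun j hj hjm => hlt (j+1) (by simpa using hj) (by omega))
            (fun j hj hjm => hge (j+1) (by simpa using hj) (by omega))

theorem pv_drop_bisect (S : List (Int × (Int × Int))) (x : Int)
    (hs : S.Pairwise (fun p q => p.2.1 ≤ q.2.1)) :
    S.drop (PySem.List.bisectLeft (S.map (fun t => t.2.1)) x)
      = S.filter (fun t => decide (x ≤ t.2.1)) := by
  have hp : (S.map (fun t => t.2.1)).Pairwise (· ≤ ·) := List.pairwise_map.mpr hs
  obtain ⟨hle, hlt, hge⟩ := PySem.List.bisectLeft_spec (S.map (fun t => t.2.1)) x hp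
  apply pv_drop_eq_filter
  · simpa using hle
  · intro j hj hjn
    have := hlt j (by simpa using hj) hjn
    simp only [List.getElem_map] at this
    simp; omega
  · intro j hj hjn
    have := hge j (by simpa using hj) hjn
    simp only [List.getElem_map] at this
    simpa using this

theorem pv_enum_filter_map (ce : List (Int × Int)) (s : Int) (q : Int × Int → Bool)
    (g : Int × Int → Int × Int) :
    ((PySem.List.enumerate ce s).filter (fun t => q t.2)).map (fun t => g t.2)
      = (ce.filter q).map g := by
  induction ce generalizing s with
  | nil => rfl
  | cons h tl ih =>
      simp only [PySem.List.enumerate_cons, List.filter_cons]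
      by_cases hq : q h
      · simp [hq, ih]
      · simp [hq, ih]

theorem pv_split (ce : List (Int × Int)) (ab : Int × Int) :
    (PySem.List.sorted
      ((((PySem.List.sorted (PySem.List.enumerate ce 0) (fun t => t.2.1) false).drop
          (PySem.List.bisectLeft ((PySem.List.sorted (PySem.List.enumerate ce 0) (fun t => t.2.1) false).map (fun t => t.2.1)) (ab.1 + 1))).filter
            (fun t => t.2.2 ≤ ab.2)).map
          (fun t => (t.1, (t.2.1 - ab.1, t.2.2 - ab.1))))
      (fun t => t.1) false).map (fun t => t.2)
    = (ce.filter (fun ed => ab.1 + 1 ≤ ed.1 && ed.2 ≤ ab.2)).map (fun ed => (ed.1 - ab.1, ed.2 - ab.1)) := by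
  set L := PySem.List.enumerate ce 0 with hL
  set S := PySem.List.sorted L (fun t => t.2.1) false with hS
  rw [pv_drop_bisect S (ab.1 + 1) (PySem.List.sorted_pairwise L (fun t => t.2.1))]
  rw [List.filter_filter]
  have hperm : ((L.filter (fun t => decide (t.2.2 ≤ ab.2) && decide (ab.1 + 1 ≤ t.2.1))).map
      (fun t => (t.1, (t.2.1 - ab.1, t.2.2 - ab.1)))).Perm
      ((S.filter (fun t => decide (t.2.2 ≤ ab.2) && decide (ab.1 + 1 ≤ t.2.1))).map
      (fun t => (t.1, (t.2.1 - ab.1, t.2.2 - ab.1)))) :=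
    ((PySem.List.sorted_perm L (fun t => t.2.1) false).symm.filter _).map _
  have hpw : ((L.filter (fun t => decide (t.2.2 ≤ ab.2) && decide (ab.1 + 1 ≤ t.2.1))).map
      (fun t => (t.1, (t.2.1 - ab.1, t.2.2 - ab.1)))).Pairwise (fun a b => a.1 < b.1) := by
    apply List.pairwise_map.mpr
    exact (PySem.List.pairwise_lt_enumerate ce 0).filter _
  refine (congrArg (List.map (fun t : Int × (Int × Int) => t.2))
    (PySem.List.sorted_eq_of_perm_of_pairwise_lt _ _ _ hperm hpw)).trans ?_
  rw [List.map_map]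
  have h1 := pv_enum_filter_map ce 0 (fun ed => decide (ed.2 ≤ ab.2) && decide (ab.1 + 1 ≤ ed.1))
    (fun ed => (ed.1 - ab.1, ed.2 - ab.1))
  have h2 : ce.filter (fun ed => decide (ed.2 ≤ ab.2) && decide (ab.1 + 1 ≤ ed.1))
      = ce.filter (fun ed => decide (ab.1 + 1 ≤ ed.1) && decide (ed.2 ≤ ab.2)) :=
    List.filter_congr (fun x _ => by simp [Bool.and_comm])
  rw [h2] at h1
  simpa using h1

-- ===== VERDICT (by name: the statement is the Claim_ definition above) =====
theorem get_split_edges_spec : Claim_equal_get_split_edges := by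
  intro ce splits _
  unfold Spec_get_split_edges get_split_edges get_split_edges_alt
  simp only [PySem.List.foldl_append_singleton_eq_map, List.nil_append]
  apply List.map_congr_left
  intro ab _
  exact (pv_split ce ab).symm
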